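-- pv_equiv track=rewrite | github.com/jaber006/PharmacyFinder | score_v2.py | determine_overall_verdict
-- ===== SOURCE A (Python) =====
-- def determine_overall_verdict(rules_checked):
--     """Overall verdict based on best rule across all 7."""
--     verdicts = [data['verdict'] for data in rules_checked.values()]
--     if 'PASS' in verdicts:
--         return 'PASS'
--     elif 'UNVERIFIED' in verdicts:
--         return 'LIKELY'
--     else:
--         return 'FAIL'
-- ===== SOURCE B (Python) =====
-- def determine_overall_verdict(rules_checked):
--     """Overall verdict based on best rule across all 7."""
--     priority = {'PASS': 2, 'UNVERIFIED': 1}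
--     best = 0
--     for data in rules_checked.values():
--         best = max(best, priority.get(data['verdict'], 0))
--     return ('FAIL', 'LIKELY', 'PASS')[best]
-- ===== Notes on version B (the rewrite author's own statement) =====
-- stated objective: idiomatic
-- what changed: Replaces the two separate membership scans over a materialised verdict list with a single pass keeping a running maximum priority (PASS=2, UNVERIFIED=1, other=0), translated back to a verdict at the end.
import Mathlib
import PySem

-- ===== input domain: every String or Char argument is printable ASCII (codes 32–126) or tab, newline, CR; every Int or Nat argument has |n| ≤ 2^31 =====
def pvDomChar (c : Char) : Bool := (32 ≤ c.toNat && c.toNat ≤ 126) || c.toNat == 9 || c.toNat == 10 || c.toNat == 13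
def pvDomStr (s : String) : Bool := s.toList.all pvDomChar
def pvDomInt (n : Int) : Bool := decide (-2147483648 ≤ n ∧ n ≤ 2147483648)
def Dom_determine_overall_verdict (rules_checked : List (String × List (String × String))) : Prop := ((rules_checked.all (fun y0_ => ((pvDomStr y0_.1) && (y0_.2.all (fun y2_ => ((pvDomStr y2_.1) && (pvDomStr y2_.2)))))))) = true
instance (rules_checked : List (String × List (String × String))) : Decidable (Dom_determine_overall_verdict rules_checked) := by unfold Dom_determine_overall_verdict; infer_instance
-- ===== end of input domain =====

-- B replaces A's two membership scans over a verdict list by one pass keeping a running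
-- maximum priority (idiomatic single-reduction form); return values are identical.

-- data['verdict'] as a first-match association-list lookup; the "" default is only
-- reached outside Pre_ (where the Python raises KeyError).
def pvLookupVerdict (d : List (String × String)) : String :=
  match d.find? (fun q => q.1 == "verdict") with
  | some q => q.2
  | none => ""

-- ===== PORT A =====
def determine_overall_verdict (rules_checked : List (String × List (String × String))) : String :=
  let verdicts := rules_checked.map (fun kv => pvLookupVerdict kv.2)
  if "PASS" ∈ verdicts then "PASS"
  else if "UNVERIFIED" ∈ verdicts then "LIKELY"
  else "FAIL"

-- ===== PORT B =====
-- priority.get(v, 0)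
def pvPrio (v : String) : Int :=
  if v == "PASS" then 2 else if v == "UNVERIFIED" then 1 else 0

def determine_overall_verdict_alt (rules_checked : List (String × List (String × String))) : String :=
  let best := rules_checked.foldl (fun b kv => max b (pvPrio (pvLookupVerdict kv.2))) 0
  if best == 2 then "PASS" else if best == 1 then "LIKELY" else "FAIL"

-- ===== PRECONDITION & SPEC =====
-- Pre_ excludes exactly the inputs where some rule's dict lacks the key 'verdict',
-- on which the Python A (and B) raises KeyError.
def Pre_determine_overall_verdict (rules_checked : List (String × List (String × String))) : Prop :=
  (rules_checked.all (fun kv => kv.2.any (fun q => q.1 == "verdict"))) = true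
instance (rules_checked : List (String × List (String × String))) : Decidable (Pre_determine_overall_verdict rules_checked) := by unfold Pre_determine_overall_verdict; infer_instance

def pvWitness_determine_overall_verdict : (List (String × List (String × String))) :=
  [("rule1", [("verdict", "PASS")]), ("rule2", [("verdict", "FAIL")])]

def Spec_determine_overall_verdict (rules_checked : List (String × List (String × String))) (out : String) : Prop := out = determine_overall_verdict_alt rules_checked
instance (rules_checked : List (String × List (String × String))) (out : String) : Decidable (Spec_determine_overall_verdict rules_checked out) := by unfold Spec_determine_overall_verdict; infer_instance

-- ===== CLAIM (what is proved, stated in full; the proofs are below) =====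
def Claim_equal_determine_overall_verdict : Prop := ∀ (rules_checked : List (String × List (String × String))), Dom_determine_overall_verdict rules_checked → Pre_determine_overall_verdict rules_checked → Spec_determine_overall_verdict rules_checked (determine_overall_verdict rules_checked)

-- ===== LEMMAS AND PROOFS =====

-- The running maximum over a verdict list, started at any b ≥ 0, is the max of b
-- and the priority A's membership tests select.
lemma foldl_prio_char (vs : List String) : ∀ b : Int, 0 ≤ b →
    vs.foldl (fun a v => max a (pvPrio v)) b
      = max b (if "PASS" ∈ vs then 2 else if "UNVERIFIED" ∈ vs then 1 else 0) := by
  induction vs with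
  | nil => intro b hb; simp; omega
  | cons v vs ih =>
    intro b hb
    have hp : 0 ≤ pvPrio v := by unfold pvPrio; split_ifs <;> omega
    have := ih (max b (pvPrio v)) (le_max_of_le_left hb)
    simp only [List.foldl_cons, this, List.mem_cons]
    by_cases h1 : v = "PASS" <;> by_cases h2 : v = "UNVERIFIED" <;>
      by_cases hP : "PASS" ∈ vs <;> by_cases hU : "UNVERIFIED" ∈ vs <;>
        simp_all [pvPrio, @eq_comm String "PASS" v, @eq_comm String "UNVERIFIED" v]

-- ===== VERDICT (by name: the statement is the Claim_ definition above) =====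
theorem determine_overall_verdict_spec : Claim_equal_determine_overall_verdict := by
  intro rc _ _
  unfold Spec_determine_overall_verdict determine_overall_verdict determine_overall_verdict_alt
  have h : rc.foldl (fun (b : Int) (kv : String × List (String × String)) => max b (pvPrio (pvLookupVerdict kv.2))) 0
      = (rc.map (fun kv => pvLookupVerdict kv.2)).foldl (fun a v => max a (pvPrio v)) 0 := by
    rw [List.foldl_map]
  simp only [h, foldl_prio_char _ 0 le_rfl]
  split_ifs <;> simp_all
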